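-- pv_equiv track=rewrite | github.com/gmy2013/icse26_failure_refinement | good_array_max_length/good_array_max_length/main.py | max_good_array_length
-- ===== SOURCE A (Python) =====
-- def max_good_array_length(l: int, r: int) -> int:
--     """Compute the maximum length n of a 'good' array for the given l and r.
--
--     A 'good' array is defined such that the sum of the first (n-1) natural numbers
--     does not exceed r - l.
--
--     Args:
--         l (int): The lower bound of the range.
--         r (int): The upper bound of the range.
--
--     Returns:
--         int: The maximum possible length n of the 'good' array.
--     """
--     max_sum = r - l
--     if max_sum < 0:
--         return 0
--
--     # Binary search for the largest n such that (n-1)*n/2 <= max_sum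
--     left: int = 1
--     right: int = 2 * 10**9  # Safe upper bound for n
--     result: int = 1
--
--     while left <= right:
--         mid: int = (left + right) // 2
--         sum_n_minus_1: int = (mid - 1) * mid // 2
--         if sum_n_minus_1 <= max_sum:
--             result = mid
--             left = mid + 1
--         else:
--             right = mid - 1
--
--     return result
-- ===== SOURCE B (Python) =====
-- def _isqrt(n: int) -> int:
--     """Floor square root of n >= 0 via integer Newton iteration."""
--     if n == 0:
--         return 0
--     x = n
--     y = (x + n // x) // 2
--     while y < x:
--         x = y
--         y = (x + n // x) // 2
--     return x
--
--
-- def max_good_array_length(l: int, r: int) -> int: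
--     max_sum = r - l
--     if max_sum < 0:
--         return 0
--     # largest n with n*(n-1)//2 <= max_sum, in closed form
--     return (1 + _isqrt(1 + 8 * max_sum)) // 2
-- ===== Notes on version B (the rewrite author's own statement) =====
-- stated objective: alternative
-- what changed: Replaced A's binary search over [1, 2*10**9] with a closed-form answer (1 + isqrt(1 + 8*(r-l))) // 2, where isqrt is an integer Newton iteration; the guard for r-l < 0 is kept.
import Mathlib
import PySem

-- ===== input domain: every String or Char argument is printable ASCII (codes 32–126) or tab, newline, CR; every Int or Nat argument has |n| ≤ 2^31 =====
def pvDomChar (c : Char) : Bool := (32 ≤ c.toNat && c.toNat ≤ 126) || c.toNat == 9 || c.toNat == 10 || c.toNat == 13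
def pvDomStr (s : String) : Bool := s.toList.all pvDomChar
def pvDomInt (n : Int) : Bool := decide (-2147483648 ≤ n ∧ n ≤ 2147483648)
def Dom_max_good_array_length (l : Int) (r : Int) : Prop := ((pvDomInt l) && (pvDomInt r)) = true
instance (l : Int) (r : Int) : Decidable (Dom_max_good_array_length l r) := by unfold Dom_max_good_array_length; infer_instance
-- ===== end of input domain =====

-- B replaces A's binary search by a closed form built on an integer Newton-iteration
-- square root (alternative algorithm; A's 2*10**9 search cap is unreachable on Dom).

-- ===== PORT A =====
-- A's `while left <= right` loop, recursion on the width of the search interval.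
def pvBsLoop (max_sum left right result : Int) : Int :=
  if _h : left ≤ right then
    let mid := PySem.Int.floordiv (left + right) 2
    let sum_n_minus_1 := PySem.Int.floordiv ((mid - 1) * mid) 2
    if sum_n_minus_1 ≤ max_sum then
      pvBsLoop max_sum (mid + 1) right mid
    else
      pvBsLoop max_sum left (mid - 1) result
  else result
termination_by (right + 1 - left).toNat
decreasing_by
  · have := PySem.Int.floordiv_two_mid_bounds _h
    omega
  · have := PySem.Int.floordiv_two_mid_bounds _h
    omega

def max_good_array_length (l : Int) (r : Int) : Int :=
  let max_sum := r - l
  if max_sum < 0 then 0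
  else pvBsLoop max_sum 1 2000000000 1

-- ===== PORT B =====
-- B's `y = (x + n//x)//2; while y < x: x = y; y = ...` Newton loop.
-- The extra `1 ≤ y` in the guard is a totality guard only: on every reachable state
-- (1 ≤ n, 1 ≤ x, as in Source B) y ≥ 1 holds, so the condition agrees with Python's `y < x`.
def pvNewtonLoop (n x : Int) : Int :=
  let y := PySem.Int.floordiv (x + PySem.Int.floordiv n x) 2
  if 1 ≤ y ∧ y < x then pvNewtonLoop n y else x
termination_by x.toNat
decreasing_by omega

-- Source B's _isqrt
def pvIsqrt (n : Int) : Int :=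
  if n = 0 then 0 else pvNewtonLoop n n

def max_good_array_length_alt (l : Int) (r : Int) : Int :=
  let max_sum := r - l
  if max_sum < 0 then 0
  else PySem.Int.floordiv (1 + pvIsqrt (1 + 8 * max_sum)) 2

-- ===== PRECONDITION & SPEC =====
def Spec_max_good_array_length (l : Int) (r : Int) (out : Int) : Prop := out = max_good_array_length_alt l r
instance (l : Int) (r : Int) (out : Int) : Decidable (Spec_max_good_array_length l r out) := by unfold Spec_max_good_array_length; infer_instance

-- ===== CLAIM (what is proved, stated in full; the proofs are below) =====
def Claim_equal_max_good_array_length : Prop := ∀ (l : Int) (r : Int), Dom_max_good_array_length l r → Spec_max_good_array_length l r (max_good_array_length l r)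

-- ===== LEMMAS AND PROOFS =====

-- "n is a feasible length for budget m": (n-1)*n//2 ≤ m, exactly A's loop test.
def pvGood (m n : Int) : Prop := PySem.Int.floordiv ((n - 1) * n) 2 ≤ m

-- feasibility is downward closed on n ≥ 1
lemma pvGood_mono (m a b : Int) (ha : 1 ≤ a) (hab : a ≤ b) (hb : pvGood m b) : pvGood m a := by
  unfold pvGood at *
  have h2 : (a - 1) * a ≤ (b - 1) * b := by nlinarith
  calc PySem.Int.floordiv ((a - 1) * a) 2
      = (a - 1) * a / 2 := PySem.Int.floordiv_eq_ediv_of_pos (by norm_num)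
    _ ≤ (b - 1) * b / 2 := Int.ediv_le_ediv (by norm_num) h2
    _ = PySem.Int.floordiv ((b - 1) * b) 2 := (PySem.Int.floordiv_eq_ediv_of_pos (by norm_num)).symm
    _ ≤ m := hb

-- Newton loop invariant: the iterate stays an upper bound of every integer square
-- root lower bound, and the result is the floor square root.
lemma pvNewton_spec (k : Nat) : ∀ n x : Int, x.toNat ≤ k → 1 ≤ n → 1 ≤ x →
    (∀ s : Int, 0 ≤ s → s * s ≤ n → s ≤ x) →
    1 ≤ pvNewtonLoop n x ∧ pvNewtonLoop n x * pvNewtonLoop n x ≤ n ∧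
      (∀ s : Int, 0 ≤ s → s * s ≤ n → s ≤ pvNewtonLoop n x) := by
  induction k with
  | zero => intro n x hk hn hx _; omega
  | succ k ih =>
    intro n x hk hn hx hinv
    have hq := (PySem.Int.floordiv_eq_iff_of_pos (b := x) (a := n) (by omega)).mp rfl
    set q := PySem.Int.floordiv n x with hqdef
    have hy := (PySem.Int.floordiv_eq_iff_of_pos (b := 2) (a := x + q) (by norm_num)).mp rfl
    set y := PySem.Int.floordiv (x + q) 2 with hydef
    have hq0 : 0 ≤ q := by nlinarith [hq.1, hq.2]
    have hxq2 : 2 ≤ x + q := by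
      rcases (by omega : x = 1 ∨ 2 ≤ x) with h1 | h2
      · subst h1; nlinarith [hq.1, hq.2]
      · omega
    have hy1 : 1 ≤ y := by omega
    rw [pvNewtonLoop]
    simp only [← hqdef, ← hydef]
    by_cases hcond : 1 ≤ y ∧ y < x
    · rw [if_pos hcond]
      apply ih n y (by omega) hn hy1
      intro s hs hsn
      have hsx : s ≤ x := hinv s hs hsn
      have h1 : x * q ≥ n - x + 1 := by nlinarith [hq.2]
      have h2 : x * (x + q) ≥ (2 * s - 1) * x + 1 := by nlinarith [sq_nonneg (x - s)]
      have h3 : 2 * s ≤ x + q := by nlinarith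
      exact (PySem.Int.le_floordiv_iff_mul_le (by norm_num)).mpr (by linarith)
    · rw [if_neg hcond]
      have hxy : x ≤ y := by omega
      have hxq : x ≤ q := by omega
      exact ⟨hx, by nlinarith [hq.1], hinv⟩

-- Source B's _isqrt computes the floor square root (characterised without Nat.sqrt)
lemma pvIsqrt_spec (n : Int) (hn : 1 ≤ n) :
    1 ≤ pvIsqrt n ∧ pvIsqrt n * pvIsqrt n ≤ n ∧
      (∀ s : Int, 0 ≤ s → s * s ≤ n → s ≤ pvIsqrt n) := by
  unfold pvIsqrt
  rw [if_neg (by omega)]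
  exact pvNewton_spec n.toNat n n le_rfl hn hn
    (fun s hs hsn => by nlinarith [sq_nonneg (s - 1)])

-- B's closed form yields the largest feasible length
lemma pvAlt_char (m n0 : Int) (hm : 0 ≤ m)
    (hdef : n0 = PySem.Int.floordiv (1 + pvIsqrt (1 + 8 * m)) 2) :
    1 ≤ n0 ∧ pvGood m n0 ∧ ¬ pvGood m (n0 + 1) := by
  obtain ⟨hs1, hs2, hs3⟩ := pvIsqrt_spec (1 + 8 * m) (by omega)
  set s := pvIsqrt (1 + 8 * m) with hsdef
  have hb : n0 * 2 ≤ 1 + s ∧ 1 + s < (n0 + 1) * 2 :=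
    (PySem.Int.floordiv_eq_iff_of_pos (by norm_num)).mp hdef.symm
  have hn01 : 1 ≤ n0 := by omega
  refine ⟨hn01, ?_, ?_⟩
  · -- (n0-1)*n0 ≤ 2m, hence its floor half ≤ m
    unfold pvGood
    have hsq : (2 * n0 - 1) * (2 * n0 - 1) ≤ s * s := by nlinarith
    have hle : (n0 - 1) * n0 ≤ 2 * m := by nlinarith
    have : PySem.Int.floordiv ((n0 - 1) * n0) 2 < m + 1 :=
      (PySem.Int.floordiv_lt_iff_lt_mul (by norm_num)).mpr (by linarith)
    omega
  · -- n0*(n0+1) ≥ 2m+2, hence its floor half > m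
    unfold pvGood
    have hsucc : 1 + 8 * m < (s + 1) * (s + 1) := by
      by_contra hc
      have := hs3 (s + 1) (by omega) (by omega)
      omega
    have hs2n : s ≤ 2 * n0 := by omega
    have hgt : 2 * m < n0 * (n0 + 1) := by nlinarith
    have heven : Even (n0 * (n0 + 1)) := Int.even_mul_succ_self n0
    obtain ⟨c, hc⟩ := heven
    have hge : (m + 1) * 2 ≤ (n0 + 1 - 1) * (n0 + 1) := by
      have : n0 * (n0 + 1) = (n0 + 1 - 1) * (n0 + 1) := by ring
      omega
    have := (PySem.Int.le_floordiv_iff_mul_le (by norm_num)).mpr hge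
    omega

-- A's binary search, given the largest feasible length N inside the search range,
-- converges to N.
lemma pvBs_inv (N m : Int) (hN1 : 1 ≤ N) (hNg : pvGood m N) (hNb : ¬ pvGood m (N + 1)) :
    ∀ k : Nat, ∀ left right result : Int, (right + 1 - left).toNat ≤ k →
      1 ≤ left → 1 ≤ result → pvGood m result →
      (result = left - 1 ∨ (left = 1 ∧ result = 1)) →
      ((N ≤ right ∧ left ≤ N + 1) ∨ (result = N ∧ N + 1 ≤ left)) →
      pvBsLoop m left right result = N := by
  intro k
  induction k with
  | zero =>
    intro left right result hk hl hr hg hK hJ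
    rw [pvBsLoop, dif_neg (by omega)]
    omega
  | succ k ih =>
    intro left right result hk hl hr hg hK hJ
    by_cases hlr : left ≤ right
    · have hmid := PySem.Int.floordiv_two_mid_bounds hlr
      rw [pvBsLoop, dif_pos hlr]
      set mid := PySem.Int.floordiv (left + right) 2 with hmiddef
      by_cases hgm : PySem.Int.floordiv ((mid - 1) * mid) 2 ≤ m
      · rw [if_pos hgm]
        have hmN : mid ≤ N := by
          by_contra hc
          exact hNb (pvGood_mono m (N + 1) mid (by omega) (by omega) hgm)
        have hJ' : N ≤ right ∧ left ≤ N + 1 := by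
          rcases hJ with h | h
          · exact h
          · omega
        exact ih (mid + 1) right mid (by omega) (by omega) (by omega) hgm
          (Or.inl (by omega)) (by omega)
      · rw [if_neg hgm]
        have hNmid : N < mid := by
          by_contra hc
          exact hgm (pvGood_mono m mid N (by omega) (by omega) hNg)
        exact ih left (mid - 1) result (by omega) hl hr hg hK (by omega)
    · rw [pvBsLoop, dif_neg hlr]
      omega

-- ===== VERDICT (by name: the statement is the Claim_ definition above) =====
theorem max_good_array_length_spec : Claim_equal_max_good_array_length := by
  intro l r hdom
  unfold Spec_max_good_array_length max_good_array_length max_good_array_length_alt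
  by_cases hm : r - l < 0
  · simp [hm]
  · simp only [if_neg hm]
    have hm' : 0 ≤ r - l := by omega
    set m := r - l with hmdef
    set n0 := PySem.Int.floordiv (1 + pvIsqrt (1 + 8 * m)) 2 with hn0def
    obtain ⟨h1, hgood, hbad⟩ := pvAlt_char m n0 hm' hn0def
    -- Dom bounds m, so the largest feasible length is below the search cap
    have hdm : m ≤ 4294967296 := by
      unfold Dom_max_good_array_length pvDomInt at hdom
      simp only [Bool.and_eq_true, decide_eq_true_eq] at hdom
      omega
    have hcap : n0 ≤ 2000000000 := by
      by_contra hc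
      have hlt : (n0 - 1) * n0 < (m + 1) * 2 :=
        (PySem.Int.floordiv_lt_iff_lt_mul (by norm_num)).mp (by unfold pvGood at hgood; omega)
      have hbig : (2000000001 - 1) * 2000000001 ≤ (n0 - 1) * n0 := by nlinarith
      linarith
    have hg1 : pvGood m 1 := by
      unfold pvGood
      have : ((1 : Int) - 1) * 1 = 0 := by ring
      rw [this]
      have : PySem.Int.floordiv 0 2 = 0 := by decide
      omega
    exact pvBs_inv n0 m h1 hgood hbad 2000000000 1 2000000000 1 (by norm_num)
      (by norm_num) (by norm_num) hg1 (Or.inr ⟨rfl, rfl⟩) (Or.inl (by omega))
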